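-- pv_equiv track=rewrite | github.com/Ti-R/tr.py.minimize_js | tr.py.minimize_js.py | isEscape
-- ===== SOURCE A (Python) =====
-- def isEscape(stringBefore):
-- 	escapeCount = 0
--
-- 	# inverse the string and look back if there is escape, count it, if pair, not escape, else escape
-- 	for charToTest in stringBefore[::-1]:
-- 		if(charToTest == "\\"):
-- 			escapeCount = escapeCount+1
-- 		else:
-- 			break
--
-- 	# pair -> no escape, the string stopped
-- 	if(escapeCount%2 == 0):
-- 		return False
-- 	return True
-- ===== SOURCE B (Python) =====
-- def isEscape(stringBefore):
-- 	# Forward state machine: a char is escaped iff the previous char was an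
-- 	# unescaped backslash. Track that flag left-to-right; no counting, no reversal.
-- 	escaped = False
-- 	for c in stringBefore:
-- 		escaped = (c == "\\") and not escaped
-- 	return escaped
-- ===== Notes on version B (the rewrite author's own statement) =====
-- stated objective: alternative
-- what changed: Replaces A's reversed scan that counts the trailing backslash run and tests its parity by a forward one-pass state machine over the whole string, maintaining a boolean flag that flips on each backslash and resets on any other character, with no counter, no parity test and no reversal.
import Mathlib
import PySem

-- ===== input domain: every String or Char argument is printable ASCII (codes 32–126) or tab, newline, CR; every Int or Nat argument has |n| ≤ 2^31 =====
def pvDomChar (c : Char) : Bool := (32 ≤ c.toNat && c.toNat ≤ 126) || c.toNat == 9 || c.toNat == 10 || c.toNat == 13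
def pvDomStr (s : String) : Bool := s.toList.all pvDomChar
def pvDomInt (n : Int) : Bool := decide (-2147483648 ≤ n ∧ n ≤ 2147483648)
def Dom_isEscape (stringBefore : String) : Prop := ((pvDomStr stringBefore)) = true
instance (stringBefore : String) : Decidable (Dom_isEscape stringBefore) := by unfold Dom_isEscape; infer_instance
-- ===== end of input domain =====

-- B replaces A's reversed trailing-run count + parity test by a forward one-pass
-- state machine tracking an 'escaped' flag (alternative algorithm, same cost).


-- ===== PORT A =====
-- the for-loop over the reversed string: count '\' until the first other char (break)
def pvLoopA : List Char → Nat
  | [] => 0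
  | c :: rest => if c == '\\' then pvLoopA rest + 1 else 0

def isEscape (stringBefore : String) : Bool :=
  let rev := (PySem.List.slice? stringBefore.toList none none (-1)).getD []  -- stringBefore[::-1]
  let escapeCount := pvLoopA rev
  if escapeCount % 2 == 0 then false else true

-- ===== PORT B =====
-- forward fold over the characters with the 'escaped' flag as accumulator
def isEscape_alt (stringBefore : String) : Bool :=
  stringBefore.toList.foldl (fun escaped c => (c == '\\') && !escaped) false

-- ===== PRECONDITION & SPEC =====
def Spec_isEscape (stringBefore : String) (out : Bool) : Prop := out = isEscape_alt stringBefore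
instance (stringBefore : String) (out : Bool) : Decidable (Spec_isEscape stringBefore out) := by unfold Spec_isEscape; infer_instance

-- ===== CLAIM (what is proved, stated in full; the proofs are below) =====
def Claim_equal_isEscape : Prop := ∀ (stringBefore : String), Dom_isEscape stringBefore → Spec_isEscape stringBefore (isEscape stringBefore)

-- ===== LEMMAS AND PROOFS =====
-- A's counter is the trailing-run length read off the reversed list
theorem pvLoopA_eq_takeWhile (l : List Char) :
    pvLoopA l = (l.takeWhile (· == '\\')).length := by
  induction l with
  | nil => rfl
  | cons c rest ih =>
    by_cases h : c = '\\'
    · simp [pvLoopA, List.takeWhile, h, ih]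
    · simp [pvLoopA, List.takeWhile, h]
      simp [show (c == '\\') = false by simp [h]]

-- B's forward fold computes the parity of the trailing backslash run
theorem pvFold_parity (l : List Char) :
    l.foldl (fun escaped c => (c == '\\') && !escaped) false =
      decide ((l.reverse.takeWhile (· == '\\')).length % 2 = 1) := by
  induction l using List.reverseRecOn with
  | nil => rfl
  | append_singleton l c ih =>
    rw [List.foldl_append, List.foldl_cons, List.foldl_nil, ih]
    by_cases h : c = '\\'
    · simp only [List.reverse_append, List.reverse_singleton, List.singleton_append,
        List.takeWhile, h, beq_self_eq_true, List.length_cons]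
      rcases Nat.mod_two_eq_zero_or_one ((l.reverse.takeWhile (· == '\\')).length) with h2 | h2 <;>
        simp [h2, Nat.add_mod, Bool.and_comm]
    · simp [List.reverse_append, show (c == '\\') = false by simp [h]]

-- ===== VERDICT (by name: the statement is the Claim_ definition above) =====
theorem isEscape_spec : Claim_equal_isEscape := by
  intro s _
  unfold Spec_isEscape isEscape isEscape_alt
  rw [pvFold_parity]
  simp only [PySem.List.slice?_none_none_neg_one, Option.getD_some, pvLoopA_eq_takeWhile]
  rcases Nat.mod_two_eq_zero_or_one ((s.toList.reverse.takeWhile (· == '\\')).length) with h | h <;>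
    simp [h]
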